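-- pv_equiv track=rewrite | github.com/soolaugust/memory-os | hooks/retriever.py | _constructive_reorder
-- ===== SOURCE A (Python) =====
-- _CONSTRUCTIVE_INTENT_ORDER = {
--     "understand":  ["reasoning_chain", "causal_chain", "conversation_summary", "decision"],
--     "fix_bug":     ["excluded_path", "decision", "reasoning_chain", "procedure"],
--     "implement":   ["procedure", "decision", "reasoning_chain", "task_state"],
--     "code_review": ["decision", "design_constraint", "procedure", "reasoning_chain"],
--     "optimize":    ["quantitative_evidence", "decision", "reasoning_chain", "causal_chain"],
--     "explore":     ["conversation_summary", "reasoning_chain", "decision", "task_state"],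
--     "continue":    ["task_state", "decision", "reasoning_chain"],
-- }
--
-- def _constructive_reorder(chunks: list, intent: str) -> list:
--     """
--     迭代310：按意图重排 chunk 列表（纯展示层，不修改 DB）。
--
--     Args:
--       chunks: list of chunk dicts（含 chunk_type 字段）
--       intent: 当前意图（来自 _predict_intent）
--
--     Returns:
--       重排后的 chunks（同一引用，顺序变化）
--     """
--     priority_order = _CONSTRUCTIVE_INTENT_ORDER.get(intent, [])
--     if not priority_order:
--         return chunks
--
--     type_priority = {t: i for i, t in enumerate(priority_order)}
--     default_priority = len(priority_order)
--
--     return sorted(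
--         chunks,
--         key=lambda c: type_priority.get(c.get("chunk_type", ""), default_priority),
--     )
-- ===== SOURCE B (Python) =====
-- _CONSTRUCTIVE_INTENT_ORDER = {
--     "understand":  ["reasoning_chain", "causal_chain", "conversation_summary", "decision"],
--     "fix_bug":     ["excluded_path", "decision", "reasoning_chain", "procedure"],
--     "implement":   ["procedure", "decision", "reasoning_chain", "task_state"],
--     "code_review": ["decision", "design_constraint", "procedure", "reasoning_chain"],
--     "optimize":    ["quantitative_evidence", "decision", "reasoning_chain", "causal_chain"],
--     "explore":     ["conversation_summary", "reasoning_chain", "decision", "task_state"],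
--     "continue":    ["task_state", "decision", "reasoning_chain"],
-- }
--
--
-- def _constructive_reorder(chunks: list, intent: str) -> list:
--     """Staged filter passes: one stable pass per priority type, then the rest.
--
--     The priority types are pairwise distinct, so each chunk matches at most one
--     filter; concatenating the passes in priority order reproduces the stable sort.
--     """
--     priority_order = _CONSTRUCTIVE_INTENT_ORDER.get(intent, [])
--     if not priority_order:
--         return chunks
--
--     picked = [c for t in priority_order
--                 for c in chunks if c.get("chunk_type", "") == t]
--     rest = [c for c in chunks if c.get("chunk_type", "") not in priority_order]
--     return picked + rest
-- ===== Notes on version B (the rewrite author's own statement) =====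
-- stated objective: alternative
-- what changed: Replaces the keyed comparison sort (enumerate dict + sorted) by staged filter passes: one in-order filter of chunks per priority type, concatenated, followed by the chunks whose type is not in the priority list; no dict and no sort are built.
import Mathlib
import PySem

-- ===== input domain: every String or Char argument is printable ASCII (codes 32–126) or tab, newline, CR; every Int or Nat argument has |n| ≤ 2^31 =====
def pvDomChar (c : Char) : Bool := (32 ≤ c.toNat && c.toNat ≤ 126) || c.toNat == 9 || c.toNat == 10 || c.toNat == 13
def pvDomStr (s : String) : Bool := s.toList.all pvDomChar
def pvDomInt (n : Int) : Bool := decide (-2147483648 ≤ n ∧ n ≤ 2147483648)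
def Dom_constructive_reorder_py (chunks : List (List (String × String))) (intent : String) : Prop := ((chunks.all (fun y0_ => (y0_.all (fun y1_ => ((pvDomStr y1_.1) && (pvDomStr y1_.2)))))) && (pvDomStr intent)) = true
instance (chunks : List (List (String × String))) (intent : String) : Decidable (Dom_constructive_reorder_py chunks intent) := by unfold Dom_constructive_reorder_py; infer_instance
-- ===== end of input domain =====

-- B replaces A's keyed comparison sort by staged filter passes (one stable pass per priority type, then the rest); alternative decomposition, no dict and no sort.

-- ===== PORT A =====
-- _CONSTRUCTIVE_INTENT_ORDER.get(intent, []) on the literal module-level dict (shared module constant)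
def pvPriorityOrder (intent : String) : List String :=
  if intent == "understand" then ["reasoning_chain", "causal_chain", "conversation_summary", "decision"]
  else if intent == "fix_bug" then ["excluded_path", "decision", "reasoning_chain", "procedure"]
  else if intent == "implement" then ["procedure", "decision", "reasoning_chain", "task_state"]
  else if intent == "code_review" then ["decision", "design_constraint", "procedure", "reasoning_chain"]
  else if intent == "optimize" then ["quantitative_evidence", "decision", "reasoning_chain", "causal_chain"]
  else if intent == "explore" then ["conversation_summary", "reasoning_chain", "decision", "task_state"]
  else if intent == "continue" then ["task_state", "decision", "reasoning_chain"]
  else []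

-- {t: i for i, t in enumerate(priority_order)}
def pvTypePriority (po : List String) : PySem.Dict String Int :=
  (PySem.List.enumerate po).foldl (fun d p => d.insert p.2 p.1) PySem.Dict.empty

def constructive_reorder_py (chunks : List (List (String × String))) (intent : String) : List (List (String × String)) :=
  let priority_order := pvPriorityOrder intent
  if priority_order = [] then chunks
  else
    let type_priority := pvTypePriority priority_order
    let default_priority : Int := (priority_order.length : Int)
    PySem.List.sorted chunks
      (fun c => type_priority.getD ((PySem.Dict.mk c).getD "chunk_type" "") default_priority) false

-- ===== PORT B =====
def constructive_reorder_py_alt (chunks : List (List (String × String))) (intent : String) : List (List (String × String)) :=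
  let priority_order := pvPriorityOrder intent
  if priority_order = [] then chunks
  else
    -- picked = [c for t in priority_order for c in chunks if c.get("chunk_type","") == t]
    let picked := priority_order.flatMap
      (fun t => chunks.filter (fun c => (PySem.Dict.mk c).getD "chunk_type" "" == t))
    -- rest = [c for c in chunks if c.get("chunk_type","") not in priority_order]
    let rest := chunks.filter
      (fun c => !(priority_order.contains ((PySem.Dict.mk c).getD "chunk_type" "")))
    picked ++ rest

-- ===== PRECONDITION & SPEC =====
def Spec_constructive_reorder_py (chunks : List (List (String × String))) (intent : String) (out : List (List (String × String))) : Prop := out = constructive_reorder_py_alt chunks intent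
instance (chunks : List (List (String × String))) (intent : String) (out : List (List (String × String))) : Decidable (Spec_constructive_reorder_py chunks intent out) := by unfold Spec_constructive_reorder_py; infer_instance

-- ===== CLAIM =====
def Claim_equal_constructive_reorder_py : Prop := ∀ (chunks : List (List (String × String))) (intent : String), Dom_constructive_reorder_py chunks intent → Spec_constructive_reorder_py chunks intent (constructive_reorder_py chunks intent)

-- ===== LEMMAS AND PROOFS =====

lemma pv_po_nodup (intent : String) : (pvPriorityOrder intent).Nodup := by
  unfold pvPriorityOrder; split_ifs <;> decide

-- lookup after folding `insert` over `enumerate t n`: the shifted index if present, else unchanged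
lemma pv_getD_enum_fold (t : List String) (n : Int) (d : PySem.Dict String Int)
    (s : String) (dflt : Int) (ht : t.Nodup) :
    ((PySem.List.enumerate t n).foldl (fun d p => d.insert p.2 p.1) d).getD s dflt
      = if s ∈ t then n + (t.idxOf s : Int) else d.getD s dflt := by
  induction t generalizing n d with
  | nil => simp [PySem.List.enumerate]
  | cons x xs ih =>
    rw [PySem.List.enumerate_cons, List.foldl_cons,
        ih (n + 1) _ (List.nodup_cons.1 ht).2]
    by_cases hx : s = x
    · subst hx
      have hns : s ∉ xs := (List.nodup_cons.1 ht).1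
      simp [hns, List.idxOf_cons_self]
    · have hix : xs.idxOf s + 1 = (x :: xs).idxOf s := by
        have hxs : (x == s) = false := beq_eq_false_iff_ne.2 (Ne.symm hx)
        simp [List.idxOf_cons, hxs]
      by_cases hm : s ∈ xs
      · have : s ∈ x :: xs := List.mem_cons_of_mem _ hm
        simp only [hm, if_true, this, ← hix]
        push_cast; ring
      · have : s ∉ x :: xs := by simp [hx, hm]
        simp [hm, this, PySem.Dict.getD_insert, hx]

-- lookup in the enumerate-built dict: the index if present, the default if not
lemma pv_typePriority_getD (po : List String) (hpo : po.Nodup) (s : String) (dflt : Int) :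
    (pvTypePriority po).getD s dflt
      = if s ∈ po then (po.idxOf s : Int) else dflt := by
  unfold pvTypePriority
  rw [pv_getD_enum_fold po 0 _ s dflt hpo]
  split_ifs with h
  · ring
  · rfl

-- helper lemmas for the bucket characterisation of PySem.List.sorted
lemma pv_insertBy_append {α : Type} (before : α → α → Bool) (x : α) (l1 l2 : List α)
    (h : ∀ y ∈ l1, before x y = false) :
    PySem.List.insertBy before x (l1 ++ l2) = l1 ++ PySem.List.insertBy before x l2 := by
  induction l1 with
  | nil => simp
  | cons y t ih =>
    simp only [List.cons_append, PySem.List.insertBy, h y (List.mem_cons_self)]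
    simp only [Bool.false_eq_true, if_false]
    rw [ih (fun z hz => h z (List.mem_cons_of_mem _ hz))]

lemma pv_insertBy_front {α : Type} (before : α → α → Bool) (x : α) (l : List α)
    (h : ∀ y ∈ l, before x y = true) :
    PySem.List.insertBy before x l = x :: l := by
  cases l with
  | nil => rfl
  | cons y t => simp [PySem.List.insertBy, h y (List.mem_cons_self)]

-- inserting x into the bucket decomposition of l appends x to its own bucket
lemma pv_insert_buckets {α : Type} (key : α → Int) :
    ∀ (len m : Nat) (x : α) (l : List α),
      (∀ c ∈ l, 0 ≤ key c) → 0 ≤ key x → (m : Int) ≤ key x → key x < (m : Int) + (len : Int) →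
      PySem.List.insertBy (fun a b => decide (key a < key b)) x
          ((List.range' m len).flatMap (fun (i : Nat) => l.filter (fun c => key c == (i : Int))))
        = (List.range' m len).flatMap (fun (i : Nat) => (l ++ [x]).filter (fun c => key c == (i : Int))) := by
  intro len
  induction len with
  | zero => intro m x l _ _ h1 h2; exfalso; simp at h2; omega
  | succ n ih =>
    intro m x l hl hx h1 h2
    rw [List.range'_succ, List.flatMap_cons, List.flatMap_cons]
    by_cases hm : key x = (m : Int)
    · rw [pv_insertBy_append _ _ _ _ (fun y hy => ?_)]
      · rw [pv_insertBy_front _ _ _ (fun y hy => ?_)]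
        · rw [List.filter_append]
          have hfx : List.filter (fun c => key c == (m : Int)) [x] = [x] := by
            simp [hm]
          rw [hfx, List.append_assoc, List.singleton_append]
          congr 2
          refine List.flatMap_congr (fun i hi => ?_)
          rcases List.mem_range'.1 hi with ⟨j, hj, rfl⟩
          rw [List.filter_append]
          have hxfilter : List.filter (fun c => key c == ((m + 1 + 1 * j : Nat) : Int)) [x] = [] := by
            simp [hm]
            omega
          rw [hxfilter, List.append_nil]
        · rcases List.mem_flatMap.1 hy with ⟨i, hi, hyi⟩
          rcases List.mem_range'.1 hi with ⟨j, hj, rfl⟩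
          have := (List.mem_filter.1 hyi).2
          have hkey : key y = ((m + 1 + 1 * j : Nat) : Int) := by exact_mod_cast beq_iff_eq.1 this
          simp only [decide_eq_true_eq]
          rw [hkey, hm]; push_cast; omega
      · have := (List.mem_filter.1 hy).2
        have hkey : key y = (m : Int) := by exact_mod_cast beq_iff_eq.1 this
        simp only [decide_eq_false_iff_not]
        rw [hkey, hm]; omega
    · have hlt : (m : Int) < key x := lt_of_le_of_ne h1 (fun h => hm h.symm)
      rw [pv_insertBy_append _ _ _ _ (fun y hy => ?_)]
      · have hfx : List.filter (fun c => key c == (m : Int)) (l ++ [x]) =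
            List.filter (fun c => key c == (m : Int)) l := by
          rw [List.filter_append]
          have : (key x == (m : Int)) = false := by simp [hm]
          simp [this]
        rw [hfx]
        congr 1
        have := ih (m + 1) x l hl hx (by push_cast; omega) (by push_cast at h2 ⊢; omega)
        simpa using this
      · have := (List.mem_filter.1 hy).2
        have hkey : key y = (m : Int) := by exact_mod_cast beq_iff_eq.1 this
        simp only [decide_eq_false_iff_not]
        rw [hkey]; omega

-- A's stable sort by a key valued in [0, n] IS the bucket decomposition, in order
lemma pv_sorted_buckets {α : Type} (key : α → Int) (n : Nat) :
    ∀ l : List α, (∀ c ∈ l, 0 ≤ key c ∧ key c ≤ (n : Int)) →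
      PySem.List.sorted l key false
        = (List.range' 0 (n + 1)).flatMap (fun (i : Nat) => l.filter (fun c => key c == (i : Int))) := by
  intro l
  induction l using List.reverseRecOn with
  | nil => intro _; simp [PySem.List.sorted]
  | append_singleton l x ih =>
    intro hb
    rw [PySem.List.sorted_eq_foldl_insertBy, List.foldl_append, List.foldl_cons, List.foldl_nil,
        ← PySem.List.sorted_eq_foldl_insertBy,
        ih (fun c hc => hb c (List.mem_append_left _ hc))]
    have hx := hb x (List.mem_append_right _ (List.mem_cons_self))
    exact pv_insert_buckets key (n + 1) 0 x l
      (fun c hc => (hb c (List.mem_append_left _ hc)).1) hx.1 (by omega) (by push_cast; omega)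

-- ===== VERDICT =====
theorem constructive_reorder_py_spec : Claim_equal_constructive_reorder_py := by
  intro chunks intent _
  simp only [Spec_constructive_reorder_py, constructive_reorder_py, constructive_reorder_py_alt]
  by_cases h : pvPriorityOrder intent = []
  · simp [h]
  · simp only [h, if_false]
    set po := pvPriorityOrder intent with hpo
    have hnd : po.Nodup := pv_po_nodup intent
    set ct : List (String × String) → String :=
      fun c => (PySem.Dict.mk c).getD "chunk_type" "" with hct
    set key : List (String × String) → Int :=
      fun c => (pvTypePriority po).getD (ct c) (po.length : Int) with hkey
    have hkeyval : ∀ c, key c = if ct c ∈ po then ((po.idxOf (ct c) : Nat) : Int) else (po.length : Int) :=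
      fun c => pv_typePriority_getD po hnd (ct c) _
    have hb : ∀ c ∈ chunks, 0 ≤ key c ∧ key c ≤ (po.length : Int) := by
      intro c _
      rw [hkeyval c]
      split_ifs with hm
      · have := List.idxOf_lt_length_of_mem hm
        omega
      · omega
    rw [pv_sorted_buckets key po.length chunks hb]
    rw [List.range'_1_concat, List.flatMap_append, List.flatMap_singleton]
    simp only [Nat.zero_add]
    congr 1
    · -- the first |po| buckets are exactly the per-type filters, in order
      have hmap : po = (List.range' 0 po.length).map (fun i => po.getD i "") := by
        apply List.ext_getElem
        · simp
        · intro i h1 h2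
          simp only [List.getElem_map, List.getElem_range']
          rw [List.getD_eq_getElem _ _ (by simpa using h1)]
          simp
      conv_rhs => rw [hmap]
      rw [List.flatMap_map]
      refine List.flatMap_congr (fun i hi => ?_)
      rcases List.mem_range'.1 hi with ⟨j, hj, rfl⟩
      simp only [Nat.zero_add, Nat.one_mul] at *
      refine List.filter_congr (fun c _ => ?_)
      rw [List.getD_eq_getElem _ _ hj]
      rw [hkeyval c]
      by_cases hc : ct c = po[j]
      · have hmem : ct c ∈ po := hc ▸ List.getElem_mem hj
        have hidx2 : List.idxOf po[j] po = j := List.Nodup.idxOf_getElem hnd j hj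
        simp [hc, hidx2]
        exact hc
      · split_ifs with hm
        · have hidx2 : List.idxOf po[j] po = j := List.Nodup.idxOf_getElem hnd j hj
          have hne : po.idxOf (ct c) ≠ j := by
            intro he
            exact hc ((List.idxOf_inj hm).1 (by rw [he, hidx2]))
          have h1 : (((po.idxOf (ct c) : Nat) : Int) == ((j : Nat) : Int)) = false := by
            simp only [beq_eq_false_iff_ne, ne_eq, Int.natCast_inj]
            exact hne
          simp [h1]
          exact hc
        · have h1 : (((po.length : Nat) : Int) == ((j : Nat) : Int)) = false := by
            simp only [beq_eq_false_iff_ne, ne_eq, Int.natCast_inj]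
            omega
          simp [h1]
          exact hc
    · -- the default bucket is the not-in-priority-order filter
      refine List.filter_congr (fun c _ => ?_)
      rw [hkeyval c]
      split_ifs with hm
      · have := List.idxOf_lt_length_of_mem hm
        have h1 : (((po.idxOf (ct c) : Nat) : Int) == ((po.length : Nat) : Int)) = false := by
          simp only [beq_eq_false_iff_ne, ne_eq, Int.natCast_inj]
          omega
        simp [h1]
        exact hm
      · simp
        exact hm
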